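-- pv_equiv track=rewrite | github.com/chunbikm59/EnterpriseAI-Client | utils/conversation_storage.py | _replay_records
-- ===== SOURCE A (Python) =====
-- def _replay_records(raw_records: list) -> tuple:
--     """重播 JSONL records，回傳 (non_msg_recs, active_messages, upload_inheritance)。
--
--     upload_inheritance: dict[新 uuid → 舊 uuid]
--       當 message_edit 截斷了一條帶有 upload 的 user message，
--       新的 user message uuid 需要繼承那個舊 uuid 的 upload 資訊。
--     """
--     from collections import OrderedDict
--     msg_order: OrderedDict = OrderedDict()  # uuid → rec，保持插入順序
--     non_msg: list = []
--     # 舊 uuid（被截斷的 user message）→ 緊接在其後的新 user message uuid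
--     upload_inheritance: dict = {}
--
--     i = 0
--     while i < len(raw_records):
--         rec = raw_records[i]
--         rt = rec.get("record_type")
--
--         if rt == "message":
--             uid = rec.get("uuid")
--             if uid:
--                 msg_order[uid] = rec
--             i += 1
--
--         elif rt == "message_edit":
--             target_uuid = rec.get("edited_message_uuid")
--             # 記錄被截斷的 user uuid（可能帶有 upload）
--             cut_user_uuid: str | None = None
--             if target_uuid and target_uuid in msg_order:
--                 keys = list(msg_order.keys())
--                 cut = keys.index(target_uuid)
--                 # 找到被截斷位置的 user message uuid
--                 for k in keys[cut:]:
--                     if msg_order[k].get("role") == "user":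
--                         cut_user_uuid = k
--                         break
--                 for k in keys[cut:]:
--                     del msg_order[k]
--             # 繼續往後加入 message records，直到下一個 message_edit
--             i += 1
--             first_new_user: str | None = None
--             while i < len(raw_records):
--                 nxt = raw_records[i]
--                 if nxt.get("record_type") == "message_edit":
--                     break
--                 if nxt.get("record_type") == "message":
--                     uid = nxt.get("uuid")
--                     if uid:
--                         msg_order[uid] = nxt
--                         # 新區段第一條 user message 繼承被截斷的 user upload
--                         if first_new_user is None and nxt.get("role") == "user" and cut_user_uuid:
--                             first_new_user = uid
--                             upload_inheritance[uid] = cut_user_uuid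
--                 else:
--                     non_msg.append((i, nxt))
--                 i += 1
--
--         else:
--             non_msg.append((i, rec))
--             i += 1
--
--     active_messages = list(msg_order.values())
--     non_msg_recs = [r for _, r in non_msg]
--     return non_msg_recs, active_messages, upload_inheritance
-- ===== SOURCE B (Python) =====
-- def _replay_records(raw_records: list) -> tuple:
--     """Single-pass state machine: ordered (uuid, rec) list + uuid->index dict,
--     truncation by slicing off the suffix directly instead of rebuilding the
--     key list on every message_edit."""
--     msgs: list = []          # [(uuid, rec)] in order
--     pos: dict = {}           # uuid -> index in msgs
--     non_msg: list = []
--     upload_inheritance: dict = {}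
--     pending = None           # cut user uuid waiting for the first new user msg
--
--     for rec in raw_records:
--         rt = rec.get("record_type")
--         if rt == "message":
--             uid = rec.get("uuid")
--             if uid:
--                 j = pos.get(uid)
--                 if j is None:
--                     pos[uid] = len(msgs)
--                     msgs.append((uid, rec))
--                 else:
--                     msgs[j] = (uid, rec)
--                 if pending and rec.get("role") == "user":
--                     upload_inheritance[uid] = pending
--                     pending = None
--         elif rt == "message_edit":
--             target = rec.get("edited_message_uuid")
--             pending = None
--             if target:
--                 j = pos.get(target)
--                 if j is not None:
--                     removed = msgs[j:]
--                     pending = next((u for u, r in removed if r.get("role") == "user"), None)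
--                     for u, _ in removed:
--                         del pos[u]
--                     del msgs[j:]
--         else:
--             non_msg.append(rec)
--
--     return non_msg, [r for _, r in msgs], upload_inheritance
-- ===== Notes on version B (the rewrite author's own statement) =====
-- stated objective: alternative
-- what changed: Replaces A's nested while-loops over an OrderedDict (rebuilding list(msg_order.keys()) and calling keys.index on every message_edit) with a single-pass state machine over an ordered (uuid, rec) list plus a uuid->index dict, truncating by slicing the list directly and carrying the pending cut-user uuid as loop state.
import Mathlib
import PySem

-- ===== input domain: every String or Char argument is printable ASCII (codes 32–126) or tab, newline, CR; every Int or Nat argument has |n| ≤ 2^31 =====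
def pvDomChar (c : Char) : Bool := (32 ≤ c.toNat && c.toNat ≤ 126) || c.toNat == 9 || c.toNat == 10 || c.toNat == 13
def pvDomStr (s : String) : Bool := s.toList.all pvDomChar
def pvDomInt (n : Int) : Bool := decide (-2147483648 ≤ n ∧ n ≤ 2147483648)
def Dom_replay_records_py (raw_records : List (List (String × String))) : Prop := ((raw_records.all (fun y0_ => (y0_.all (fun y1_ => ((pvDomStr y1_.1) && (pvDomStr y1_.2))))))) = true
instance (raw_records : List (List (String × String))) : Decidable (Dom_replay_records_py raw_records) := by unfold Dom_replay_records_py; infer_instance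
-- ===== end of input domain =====

-- B replaces A's nested while-loops over an OrderedDict (key list rebuilt on every edit) by a
-- single-pass state machine over an ordered (uuid, rec) list plus a uuid→index dict, truncating
-- by direct slicing: a structurally different traversal of the same records.

abbrev PRec : Type := List (String × String)
abbrev PMO : Type := PySem.Dict String PRec
abbrev PInh : Type := PySem.Dict String String

-- ===== PORT A =====
-- rec.get(k) on a JSON record (dict → association list, first match)
def pvGet (r : PRec) (k : String) : Option String := (PySem.Dict.mk r).get? k

-- inner `while i < len(raw_records)` loop of the message_edit branch; returns
-- (remaining records, i, msg_order, non_msg, upload_inheritance)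
def pvAInner : List PRec → Int → PMO → List (Int × PRec) → PInh → Option String → Option String →
    List PRec × Int × PMO × List (Int × PRec) × PInh
  | [], i, mo, nm, inh, _, _ => ([], i, mo, nm, inh)
  | nxt :: t, i, mo, nm, inh, cut, fnu =>
    if pvGet nxt "record_type" == some "message_edit" then
      (nxt :: t, i, mo, nm, inh)
    else if pvGet nxt "record_type" == some "message" then
      match pvGet nxt "uuid" with
      | some u =>
        if u == "" then pvAInner t (i+1) mo nm inh cut fnu   -- `if uid:` falsy
        else
          match fnu, cut with
          | none, some c =>
            if pvGet nxt "role" == some "user" && c != "" then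
              pvAInner t (i+1) (mo.insert u nxt) nm (inh.insert u c) cut (some u)
            else pvAInner t (i+1) (mo.insert u nxt) nm inh cut fnu
          | _, _ => pvAInner t (i+1) (mo.insert u nxt) nm inh cut fnu
      | none => pvAInner t (i+1) mo nm inh cut fnu
    else pvAInner t (i+1) mo (nm ++ [(i, nxt)]) inh cut fnu

-- the remaining-record list the inner loop returns is a suffix (needed for termination of pvAOuter)
theorem pvAInner_fst_le (rest : List PRec) (i : Int) (mo : PMO) (nm : List (Int × PRec)) (inh : PInh)
    (cut fnu : Option String) : (pvAInner rest i mo nm inh cut fnu).1.length ≤ rest.length := by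
  induction rest generalizing i mo nm inh cut fnu with
  | nil => simp [pvAInner]
  | cons nxt t ih =>
    simp only [pvAInner]
    split
    · simp
    · split
      · split
        · split
          · exact le_trans (ih ..) (by simp)
          · split
            · split
              · exact le_trans (ih ..) (by simp)
              · exact le_trans (ih ..) (by simp)
            · exact le_trans (ih ..) (by simp)
        · exact le_trans (ih ..) (by simp)
      · exact le_trans (ih ..) (by simp)

-- outer `while i < len(raw_records)` loop
def pvAOuter : List PRec → Int → PMO → List (Int × PRec) → PInh → PMO × List (Int × PRec) × PInh
  | [], _, mo, nm, inh => (mo, nm, inh)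
  | rec :: t, i, mo, nm, inh =>
    if pvGet rec "record_type" == some "message" then
      (match pvGet rec "uuid" with
       | some u =>
         if u == "" then pvAOuter t (i+1) mo nm inh
         else pvAOuter t (i+1) (mo.insert u rec) nm inh
       | none => pvAOuter t (i+1) mo nm inh)
    else if pvGet rec "record_type" == some "message_edit" then
      let tc : Option String × PMO :=
        match pvGet rec "edited_message_uuid" with
        | some tg =>
          if tg != "" && mo.contains tg then
            match PySem.List.index? mo.keys tg with
            | some cutIdx =>
              let suffix := mo.keys.drop cutIdx
              ((suffix.find? fun k => pvGet ((mo.get? k).getD []) "role" == some "user"),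
               suffix.foldl (fun d k => d.erase k) mo)
            | none => (none, mo)   -- unreachable: contains tg holds, keys.index never raises here
          else (none, mo)
        | none => (none, mo)
      let r := pvAInner t (i+1) tc.2 nm inh tc.1 none
      pvAOuter r.1 r.2.1 r.2.2.1 r.2.2.2.1 r.2.2.2.2
    else pvAOuter t (i+1) mo (nm ++ [(i, rec)]) inh
  termination_by rest _ _ _ _ => rest.length
  decreasing_by
    all_goals simp only [List.length_cons]
    all_goals first
      | omega
      | exact Nat.lt_succ_of_le (pvAInner_fst_le ..)

def replay_records_py (raw_records : List (List (String × String))) :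
    (List (List (String × String))) × (List (List (String × String))) × (List (String × String)) :=
  let r := pvAOuter raw_records 0 PySem.Dict.empty [] PySem.Dict.empty
  (r.2.1.map (fun p => p.2), r.1.values, r.2.2.items)

-- ===== PORT B =====
-- B state: (msgs as ordered (uuid, rec) pairs, pos uuid→index, non_msg, upload_inheritance, pending)
abbrev PBSt : Type := List (String × PRec) × PySem.Dict String Int × List PRec × PInh × Option String

def pvBStep (s : PBSt) (rec : PRec) : PBSt :=
  match s with
  | (msgs, pos, nm, inh, pending) =>
    if pvGet rec "record_type" == some "message" then
      match pvGet rec "uuid" with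
      | some u =>
        if u == "" then (msgs, pos, nm, inh, pending)
        else
          let mp : List (String × PRec) × PySem.Dict String Int :=
            match pos.get? u with
            | some j => (msgs.set j.toNat (u, rec), pos)   -- stored indices are ≥ 0: toNat is exact
            | none => (msgs ++ [(u, rec)], pos.insert u (msgs.length : Int))
          match pending with
          | some c =>
            if c != "" && pvGet rec "role" == some "user" then (mp.1, mp.2, nm, inh.insert u c, none)
            else (mp.1, mp.2, nm, inh, pending)
          | none => (mp.1, mp.2, nm, inh, none)
      | none => (msgs, pos, nm, inh, pending)
    else if pvGet rec "record_type" == some "message_edit" then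
      match pvGet rec "edited_message_uuid" with
      | some tg =>
        if tg == "" then (msgs, pos, nm, inh, none)
        else
          match pos.get? tg with
          | some j =>
            let removed := msgs.drop j.toNat   -- stored indices are ≥ 0: toNat is exact
            (msgs.take j.toNat,
             removed.foldl (fun d p => d.erase p.1) pos, nm, inh,
             (removed.find? fun p => pvGet p.2 "role" == some "user").map (fun p => p.1))
          | none => (msgs, pos, nm, inh, none)
      | none => (msgs, pos, nm, inh, none)
    else (msgs, pos, nm ++ [rec], inh, pending)

def replay_records_py_alt (raw_records : List (List (String × String))) :
    (List (List (String × String))) × (List (List (String × String))) × (List (String × String)) :=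
  let s := raw_records.foldl pvBStep ([], PySem.Dict.empty, [], PySem.Dict.empty, none)
  (s.2.2.1, s.1.map (fun p => p.2), s.2.2.2.1.items)

-- ===== PRECONDITION & SPEC =====
def Spec_replay_records_py (raw_records : List (List (String × String))) (out : (List (List (String × String))) × (List (List (String × String))) × (List (String × String))) : Prop := out = replay_records_py_alt raw_records
instance (raw_records : List (List (String × String))) (out : (List (List (String × String))) × (List (List (String × String))) × (List (String × String))) : Decidable (Spec_replay_records_py raw_records out) := by unfold Spec_replay_records_py; infer_instance

-- ===== CLAIM (what is proved, stated in full; the proofs are below) =====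
def Claim_equal_replay_records_py : Prop := ∀ (raw_records : List (List (String × String))), Dom_replay_records_py raw_records → Spec_replay_records_py raw_records (replay_records_py raw_records)

-- ===== LEMMAS AND PROOFS =====

theorem pvFind?_congr {α : Type} (l : List α) (p q : α → Bool) (h : ∀ x ∈ l, p x = q x) :
    l.find? p = l.find? q := by
  induction l with
  | nil => rfl
  | cons x t ih =>
    simp only [List.find?_cons]
    rw [h x (by simp)]
    split
    · rfl
    · exact ih (fun y hy => h y (by simp [hy]))

theorem pvGet?_erase {ν : Type} (d : PySem.Dict String ν) (k u : String) :
    (d.erase k).get? u = if u = k then none else d.get? u := by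
  simp only [PySem.Dict.erase, PySem.Dict.get?, List.find?_filter]
  by_cases huk : u = k
  · subst huk
    rw [if_pos rfl, List.find?_eq_none.mpr]
    · rfl
    · intro x _
      simp
  · rw [if_neg huk, pvFind?_congr _ _ (fun p => p.1 == u)]
    intro x _
    by_cases hxu : x.1 = u <;> simp [hxu, huk, Ne.symm]

theorem pvGet?_foldl_erase {ν : Type} (ks : List String) (d : PySem.Dict String ν) (u : String) :
    (ks.foldl (fun d k => d.erase k) d).get? u = if u ∈ ks then none else d.get? u := by
  induction ks generalizing d with
  | nil => simp
  | cons k t ih =>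
    simp only [List.foldl_cons, ih, pvGet?_erase, List.mem_cons]
    by_cases h1 : u ∈ t <;> by_cases h2 : u = k <;> simp [h1, h2]

theorem pvItems_foldl_erase {ν : Type} (suf pre : List (String × ν)) (d : PySem.Dict String ν)
    (hd : d.items = pre ++ suf) (hnd : ((pre ++ suf).map Prod.fst).Nodup) :
    ((suf.map Prod.fst).foldl (fun d k => d.erase k) d).items = pre := by
  induction suf generalizing d with
  | nil => simpa using hd
  | cons s t ih =>
    have hnd' := hnd
    simp only [List.map_append, List.map_cons, List.nodup_append, List.nodup_cons] at hnd'
    have hs1pre : s.1 ∉ List.map Prod.fst pre := fun h => hnd'.2.2 _ h s.1 (by simp) rfl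
    have hs1t : s.1 ∉ List.map Prod.fst t := hnd'.2.1.1
    have hpre : ∀ p ∈ pre, (!p.1 == s.1) = true := by
      intro p hp
      simp only [Bool.not_eq_eq_eq_not, Bool.not_true, beq_eq_false_iff_ne]
      exact fun h => hs1pre (h ▸ List.mem_map_of_mem hp)
    have ht : ∀ p ∈ t, (!p.1 == s.1) = true := by
      intro p hp
      simp only [Bool.not_eq_eq_eq_not, Bool.not_true, beq_eq_false_iff_ne]
      exact fun h => hs1t (h ▸ List.mem_map_of_mem hp)
    simp only [List.map_cons, List.foldl_cons]
    apply ih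
    · show (d.erase s.1).items = pre ++ t
      simp only [PySem.Dict.erase, hd]
      rw [List.filter_append, List.filter_eq_self.mpr hpre, List.filter_cons]
      have hs : (!s.1 == s.1) = false := by simp
      simp only [hs, Bool.false_eq_true, if_false, List.filter_eq_self.mpr ht]
    · refine List.Nodup.sublist ?_ hnd
      refine List.Sublist.map _ (List.Sublist.append (List.Sublist.refl _) (List.sublist_cons_self _ _))

theorem pvMapReplace_eq_set {ν : Type} (msgs : List (String × ν)) (u : String) (rec : ν) (n : Nat)
    (hnd : (msgs.map Prod.fst).Nodup) (h : List.idxOf? u (msgs.map Prod.fst) = some n) :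
    msgs.map (fun p => if p.1 == u then (u, rec) else p) = msgs.set n (u, rec) := by
  induction msgs generalizing n with
  | nil => simp at h
  | cons p t ih =>
    simp only [List.map_cons, List.idxOf?_cons, List.nodup_cons] at h hnd
    by_cases hpu : p.1 = u
    · simp only [hpu, beq_self_eq_true] at h ⊢
      cases h
      simp only [List.set_cons_zero, List.map_cons, List.cons.injEq]
      have : ∀ q ∈ t, (fun p => if p.1 == u then (u, rec) else p) q = q := by
        intro q hq
        have : q.1 ≠ u := fun he => hnd.1 (hpu ▸ he ▸ List.mem_map_of_mem hq (f := Prod.fst))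
        simp [this]
      refine ⟨by simp [hpu], ?_⟩
      have := List.map_congr_left this
      simpa using this
    · have hb : (p.1 == u) = false := by simp [hpu]
      simp only [hb, Bool.false_eq_true, if_false] at h ⊢
      cases hm : List.idxOf? u (t.map Prod.fst) with
      | none => simp [hm] at h
      | some m =>
        simp only [hm, Option.map_some] at h
        cases h
        simp only [List.map_cons, hb, Bool.false_eq_true, if_false, List.set_cons_succ, List.cons.injEq, true_and]
        exact ih m hnd.2 hm

-- A's msg_order and B's (msgs, pos) describe the same ordered map
def pvInv (mo : PMO) (msgs : List (String × PRec)) (pos : PySem.Dict String Int) : Prop :=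
  mo.items = msgs ∧ (msgs.map Prod.fst).Nodup ∧
  ∀ u : String, pos.get? u = Option.map Int.ofNat (PySem.List.index? (msgs.map Prod.fst) u)

theorem pvInv_empty : pvInv PySem.Dict.empty [] PySem.Dict.empty := by
  refine ⟨rfl, by simp, ?_⟩
  intro u
  simp [PySem.Dict.get?, PySem.Dict.empty, PySem.List.index?]

-- A's `target in msg_order` + keys.index(target) agree with B's pos lookup
theorem pvContains_false (mo : PMO) (msgs : List (String × PRec)) (pos : PySem.Dict String Int)
    (tg : String) (h : pvInv mo msgs pos) (hn : pos.get? tg = none) : mo.contains tg = false := by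
  obtain ⟨hi, hnd, hpos⟩ := h
  have hidx := hpos tg
  rw [hn] at hidx
  simp only [PySem.List.index?] at hidx
  have hnone : List.idxOf? tg (msgs.map Prod.fst) = none := by
    cases hx : List.idxOf? tg (msgs.map Prod.fst) with
    | none => rfl
    | some n => rw [hx] at hidx; simp at hidx
  have hmem : tg ∉ msgs.map Prod.fst := List.idxOf?_eq_none_iff.mp hnone
  simp only [PySem.Dict.contains, hi, List.any_eq_false]
  intro p hp
  simp only [beq_iff_eq]
  exact fun he => hmem (he ▸ (List.mem_map_of_mem hp (f := Prod.fst)))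

theorem pvIndex_eq (mo : PMO) (msgs : List (String × PRec)) (pos : PySem.Dict String Int)
    (tg : String) (j : Int) (h : pvInv mo msgs pos) (hj : pos.get? tg = some j) :
    PySem.List.index? mo.keys tg = some j.toNat ∧ mo.contains tg = true := by
  obtain ⟨hi, hnd, hpos⟩ := h
  have hidx := hpos tg
  rw [hj] at hidx
  simp only [PySem.List.index?] at hidx
  cases hx : List.idxOf? tg (msgs.map Prod.fst) with
  | none => rw [hx] at hidx; simp at hidx
  | some n =>
    rw [hx] at hidx
    simp only [Option.map_some, Option.some.injEq] at hidx
    have hkeys : mo.keys = msgs.map Prod.fst := by simp [PySem.Dict.keys, hi]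
    have htn : j.toNat = n := by simp [hidx]
    obtain ⟨hlt, hget, -⟩ := List.idxOf?_eq_some_iff.mp hx
    refine ⟨?_, ?_⟩
    · simp only [PySem.List.index?, hkeys, hx, htn]
    · have hmem : tg ∈ msgs.map Prod.fst := hget ▸ List.getElem_mem hlt
      obtain ⟨p, hp, hpe⟩ := List.mem_map.mp hmem
      simp only [PySem.Dict.contains, hi, List.any_eq_true]
      exact ⟨p, hp, by simp [hpe]⟩

theorem pvInv_insert_new (mo : PMO) (msgs : List (String × PRec)) (pos : PySem.Dict String Int)
    (u : String) (rec : PRec) (h : pvInv mo msgs pos) (hu : pos.get? u = none) :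
    pvInv (mo.insert u rec) (msgs ++ [(u, rec)]) (pos.insert u (msgs.length : Int)) := by
  obtain ⟨hi, hnd, hpos⟩ := h
  have hc : mo.contains u = false := pvContains_false mo msgs pos u ⟨hi, hnd, hpos⟩ hu
  have hidx : List.idxOf? u (msgs.map Prod.fst) = none := by
    have hx := hpos u
    rw [hu] at hx
    simp only [PySem.List.index?] at hx
    cases hy : List.idxOf? u (msgs.map Prod.fst) with
    | none => rfl
    | some n => rw [hy] at hx; simp at hx
  have hmem : u ∉ msgs.map Prod.fst := List.idxOf?_eq_none_iff.mp hidx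
  refine ⟨?_, ?_, ?_⟩
  · rw [PySem.Dict.items_insert_of_not_contains _ _ hc, hi]
  · simp only [List.map_append, List.map_cons, List.map_nil]
    rw [List.nodup_append]
    refine ⟨hnd, List.nodup_singleton u, ?_⟩
    intro a ha b hb heq
    rw [List.mem_singleton] at hb
    subst hb; subst heq
    exact hmem ha
  · intro u'
    rw [PySem.Dict.get?_insert]
    simp only [PySem.List.index?]
    have hfull : List.idxOf? u' (List.map Prod.fst (msgs ++ [(u, rec)]))
        = (List.idxOf? u' (msgs.map Prod.fst)).or
          ((List.idxOf? u' [u]).map (fun i => i + (msgs.map Prod.fst).length)) := by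
      simp only [List.map_append, List.map_cons, List.map_nil, List.idxOf?, List.findIdx?_append]
    rw [hfull]
    by_cases he : u' = u
    · subst he
      have h1 : List.idxOf? u' (msgs.map Prod.fst) = none := hidx
      have h2 : List.idxOf? u' [u'] = some 0 := by simp [List.idxOf?, List.findIdx?_cons]
      rw [h1, h2]
      simp [Option.or]
    · have h2 : List.idxOf? u' [u] = none := by
        simp [List.idxOf?, List.findIdx?_cons, List.findIdx?_nil, Ne.symm he]
      rw [h2]
      simp only [Option.map_none, Option.or_none]
      rw [if_neg he]
      exact hpos u' 

theorem pvInv_insert_old (mo : PMO) (msgs : List (String × PRec)) (pos : PySem.Dict String Int)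
    (u : String) (rec : PRec) (j : Int) (h : pvInv mo msgs pos) (hu : pos.get? u = some j) :
    pvInv (mo.insert u rec) (msgs.set j.toNat (u, rec)) pos := by
  obtain ⟨hi, hnd, hpos⟩ := h
  have hx := hpos u
  rw [hu] at hx
  simp only [PySem.List.index?] at hx
  cases hy : List.idxOf? u (msgs.map Prod.fst) with
  | none => rw [hy] at hx; simp at hx
  | some n =>
    rw [hy] at hx
    simp only [Option.map_some, Option.some.injEq] at hx
    have htn : j.toNat = n := by simp [hx]
    obtain ⟨hlt, hget, -⟩ := List.idxOf?_eq_some_iff.mp hy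
    have hmem : u ∈ msgs.map Prod.fst := hget ▸ List.getElem_mem hlt
    have hc : mo.contains u = true := by
      obtain ⟨p, hp, hpe⟩ := List.mem_map.mp hmem
      simp only [PySem.Dict.contains, hi, List.any_eq_true]
      exact ⟨p, hp, by simp [hpe]⟩
    have hkeyset : (msgs.set j.toNat (u, rec)).map Prod.fst = msgs.map Prod.fst := by
      rw [htn, List.map_set]
      have := List.set_getElem_self (as := msgs.map Prod.fst) (i := n) (by simpa using hlt)
      rw [← hget]
      simpa using this
    refine ⟨?_, ?_, ?_⟩
    · rw [PySem.Dict.items_insert_of_contains _ _ hc, hi, htn]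
      exact pvMapReplace_eq_set msgs u rec n hnd hy
    · rw [hkeyset]; exact hnd
    · intro u'
      rw [hkeyset]
      exact hpos u' 

-- truncation: A's per-key erase of the key-list suffix = taking the prefix of msgs
theorem pvInv_truncate (mo : PMO) (msgs : List (String × PRec)) (pos : PySem.Dict String Int)
    (j : Int) (h : pvInv mo msgs pos) :
    pvInv (((mo.keys.drop j.toNat).foldl (fun d k => d.erase k) mo))
      (msgs.take j.toNat)
      ((msgs.drop j.toNat).foldl (fun d p => d.erase p.1) pos) := by
  obtain ⟨hi, hnd, hpos⟩ := h
  have hkeys : mo.keys = msgs.map Prod.fst := by simp [PySem.Dict.keys, hi]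
  have htd : msgs.take j.toNat ++ msgs.drop j.toNat = msgs := List.take_append_drop _ _
  have hnd' : ((msgs.take j.toNat ++ msgs.drop j.toNat).map Prod.fst).Nodup := by rw [htd]; exact hnd
  have hndK : ((msgs.map Prod.fst).take j.toNat ++ (msgs.map Prod.fst).drop j.toNat).Nodup := by
    rw [List.take_append_drop]; exact hnd
  have hdisj := (List.nodup_append.mp hndK).2.2
  refine ⟨?_, ?_, ?_⟩
  · rw [hkeys, ← List.map_drop]
    exact pvItems_foldl_erase (msgs.drop j.toNat) (msgs.take j.toNat) mo (by rw [hi, htd]) hnd'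
  · exact List.Nodup.sublist (List.Sublist.map Prod.fst (List.take_sublist _ _)) hnd
  · intro u
    simp only [PySem.List.index?]
    rw [← List.foldl_map (f := Prod.fst) (g := fun d k => PySem.Dict.erase d k), pvGet?_foldl_erase, List.map_take]
    by_cases hu : u ∈ (msgs.drop j.toNat).map Prod.fst
    · rw [if_pos hu]
      have hnt : u ∉ (msgs.map Prod.fst).take j.toNat := by
        intro hmem
        exact hdisj _ hmem _ (by rwa [List.map_drop] at hu) rfl
      rw [List.idxOf?_eq_none_iff.mpr hnt]
      rfl
    · rw [if_neg hu, hpos u]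
      simp only [PySem.List.index?]
      have hsplit : List.idxOf? u (msgs.map Prod.fst)
          = ((List.idxOf? u ((msgs.map Prod.fst).take j.toNat)).or
             ((List.idxOf? u ((msgs.map Prod.fst).drop j.toNat)).map
               (fun i => i + ((msgs.map Prod.fst).take j.toNat).length))) := by
        conv_lhs => rw [← List.take_append_drop j.toNat (msgs.map Prod.fst)]
        simp only [List.idxOf?, List.findIdx?_append]
      have hdn : List.idxOf? u ((msgs.map Prod.fst).drop j.toNat) = none :=
        List.idxOf?_eq_none_iff.mpr (by rwa [← List.map_drop])
      rw [hsplit, hdn]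
      simp

-- truncation: A's scan of the key-list suffix through msg_order = B's scan of the dropped pairs
theorem pvCutUser_eq (mo : PMO) (msgs : List (String × PRec)) (pos : PySem.Dict String Int)
    (j : Int) (h : pvInv mo msgs pos) :
    ((mo.keys.drop j.toNat).find? fun k => pvGet ((mo.get? k).getD []) "role" == some "user")
      = ((msgs.drop j.toNat).find? fun p => pvGet p.2 "role" == some "user").map (fun p => p.1) := by
  obtain ⟨hi, hnd, hpos⟩ := h
  have hkeys : mo.keys = msgs.map Prod.fst := by simp [PySem.Dict.keys, hi]
  rw [hkeys, ← List.map_drop, List.find?_map]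
  congr 1
  apply pvFind?_congr
  intro p hp
  have hpm : p ∈ mo.items := by rw [hi]; exact List.mem_of_mem_drop hp
  have hpm' : (p.1, p.2) ∈ mo.items := by rwa [Prod.mk.eta]
  have hget : mo.get? p.1 = some p.2 := PySem.Dict.get?_of_mem_items mo hpm' (by rw [hkeys]; exact hnd)
  simp [Function.comp, hget]

-- A's first_new_user/cut pair corresponds to B's single pending value
def pvPendOf (fnu cut : Option String) : Option String :=
  match fnu with
  | none => cut
  | some _ => none

def pvRel (a : List PRec × Int × PMO × List (Int × PRec) × PInh) (s : PBSt) : Prop :=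
  pvInv a.2.2.1 s.1 s.2.1 ∧ a.2.2.2.1.map (fun p => p.2) = s.2.2.1 ∧ a.2.2.2.2 = s.2.2.2.1

-- simulation of the inner loop by a foldl over the consumed prefix
theorem pvInner_sim (rest : List PRec) : ∀ (i : Int) (mo : PMO) (nm : List (Int × PRec)) (inh : PInh)
    (cut fnu : Option String) (msgs : List (String × PRec)) (pos : PySem.Dict String Int),
    pvInv mo msgs pos →
    ∃ consumed rest', rest = consumed ++ rest' ∧
      (∀ r t', rest' = r :: t' → (pvGet r "record_type" == some "message_edit") = true) ∧
      (pvAInner rest i mo nm inh cut fnu).1 = rest' ∧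
      pvRel (pvAInner rest i mo nm inh cut fnu)
        (consumed.foldl pvBStep (msgs, pos, nm.map (fun p => p.2), inh, pvPendOf fnu cut)) := by
  induction rest with
  | nil =>
    intro i mo nm inh cut fnu msgs pos h
    refine ⟨[], [], rfl, ?_, ?_, ?_⟩
    · intro r t' hr; cases hr
    · rfl
    · exact ⟨h, rfl, rfl⟩
  | cons nxt t ih =>
    intro i mo nm inh cut fnu msgs pos h
    by_cases hedit : (pvGet nxt "record_type" == some "message_edit") = true
    · refine ⟨[], nxt :: t, rfl, ?_, ?_, ?_⟩
      · intro r t' hr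
        cases hr; exact hedit
      · simp [pvAInner, hedit]
      · simp only [pvAInner, hedit, if_pos, List.foldl_nil]
        exact ⟨h, rfl, rfl⟩
    · by_cases hmsg : (pvGet nxt "record_type" == some "message") = true
      · cases huid : pvGet nxt "uuid" with
        | none =>
          obtain ⟨c', r', hsplit, hh, hfst, hrel⟩ := ih (i+1) mo nm inh cut fnu msgs pos h
          refine ⟨nxt :: c', r', by simp [hsplit], hh, ?_, ?_⟩
          · rw [← hfst]; simp [pvAInner, hedit, hmsg, huid]
          · have hstep : pvBStep (msgs, pos, nm.map (fun p => p.2), inh, pvPendOf fnu cut) nxt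
                = (msgs, pos, nm.map (fun p => p.2), inh, pvPendOf fnu cut) := by
              simp [pvBStep, hmsg, huid]
            have hA : pvAInner (nxt :: t) i mo nm inh cut fnu = pvAInner t (i+1) mo nm inh cut fnu := by
              simp [pvAInner, hedit, hmsg, huid]
            rw [hA, List.foldl_cons, hstep]
            exact hrel
        | some u =>
          by_cases hue : (u == "") = true
          · obtain ⟨c', r', hsplit, hh, hfst, hrel⟩ := ih (i+1) mo nm inh cut fnu msgs pos h
            refine ⟨nxt :: c', r', by simp [hsplit], hh, ?_, ?_⟩
            · rw [← hfst]; simp [pvAInner, hedit, hmsg, huid, hue]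
            · have hstep : pvBStep (msgs, pos, nm.map (fun p => p.2), inh, pvPendOf fnu cut) nxt
                  = (msgs, pos, nm.map (fun p => p.2), inh, pvPendOf fnu cut) := by
                simp [pvBStep, hmsg, huid, hue]
              have hA : pvAInner (nxt :: t) i mo nm inh cut fnu = pvAInner t (i+1) mo nm inh cut fnu := by
                simp [pvAInner, hedit, hmsg, huid, hue]
              rw [hA, List.foldl_cons, hstep]
              exact hrel
          · -- real message with nonempty uuid: mo.insert u nxt vs B's set/append
            have hmp : ∀ (mp : List (String × PRec) × PySem.Dict String Int),
                (mp = match pos.get? u with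
                      | some j => (msgs.set j.toNat (u, nxt), pos)
                      | none => (msgs ++ [(u, nxt)], pos.insert u (msgs.length : Int))) →
                pvInv (mo.insert u nxt) mp.1 mp.2 := by
              intro mp hmpdef
              cases hpj : pos.get? u with
              | some j =>
                rw [hpj] at hmpdef
                rw [hmpdef]
                exact pvInv_insert_old mo msgs pos u nxt j h hpj
              | none =>
                rw [hpj] at hmpdef
                rw [hmpdef]
                exact pvInv_insert_new mo msgs pos u nxt h hpj
            -- the B step for this record
            cases fnu with
            | some f =>
              obtain ⟨c', r', hsplit, hh, hfst, hrel⟩ :=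
                ih (i+1) (mo.insert u nxt) nm inh cut (some f) _ _ (hmp _ rfl)
              refine ⟨nxt :: c', r', by simp [hsplit], hh, ?_, ?_⟩
              · rw [← hfst]; simp [pvAInner, hedit, hmsg, huid, hue]
              · have hA : pvAInner (nxt :: t) i mo nm inh cut (some f)
                    = pvAInner t (i+1) (mo.insert u nxt) nm inh cut (some f) := by
                  simp [pvAInner, hedit, hmsg, huid, hue]
                rw [hA, List.foldl_cons]
                have hstep : pvBStep (msgs, pos, nm.map (fun p => p.2), inh, pvPendOf (some f) cut) nxt
                    = ((match pos.get? u with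
                        | some j => (msgs.set j.toNat (u, nxt), pos)
                        | none => (msgs ++ [(u, nxt)], pos.insert u (msgs.length : Int))).1,
                       (match pos.get? u with
                        | some j => (msgs.set j.toNat (u, nxt), pos)
                        | none => (msgs ++ [(u, nxt)], pos.insert u (msgs.length : Int))).2,
                       nm.map (fun p => p.2), inh, pvPendOf (some f) cut) := by
                  simp [pvBStep, hmsg, huid, hue, pvPendOf]
                rw [hstep]
                exact hrel
            | none =>
              cases cut with
              | none =>
                obtain ⟨c', r', hsplit, hh, hfst, hrel⟩ :=
                  ih (i+1) (mo.insert u nxt) nm inh none none _ _ (hmp _ rfl)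
                refine ⟨nxt :: c', r', by simp [hsplit], hh, ?_, ?_⟩
                · rw [← hfst]; simp [pvAInner, hedit, hmsg, huid, hue]
                · have hA : pvAInner (nxt :: t) i mo nm inh none none
                      = pvAInner t (i+1) (mo.insert u nxt) nm inh none none := by
                    simp [pvAInner, hedit, hmsg, huid, hue]
                  rw [hA, List.foldl_cons]
                  have hstep : pvBStep (msgs, pos, nm.map (fun p => p.2), inh, pvPendOf none none) nxt
                      = ((match pos.get? u with
                          | some j => (msgs.set j.toNat (u, nxt), pos)
                          | none => (msgs ++ [(u, nxt)], pos.insert u (msgs.length : Int))).1,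
                         (match pos.get? u with
                          | some j => (msgs.set j.toNat (u, nxt), pos)
                          | none => (msgs ++ [(u, nxt)], pos.insert u (msgs.length : Int))).2,
                         nm.map (fun p => p.2), inh, pvPendOf none none) := by
                    simp [pvBStep, hmsg, huid, hue, pvPendOf]
                  rw [hstep]
                  exact hrel
              | some c =>
                by_cases hcond : (pvGet nxt "role" == some "user" && c != "") = true
                · obtain ⟨c', r', hsplit, hh, hfst, hrel⟩ :=
                    ih (i+1) (mo.insert u nxt) nm (inh.insert u c) (some c) (some u) _ _ (hmp _ rfl)
                  refine ⟨nxt :: c', r', by simp [hsplit], hh, ?_, ?_⟩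
                  · rw [← hfst]; simp [pvAInner, hedit, hmsg, huid, hue, hcond]
                  · have hA : pvAInner (nxt :: t) i mo nm inh (some c) none
                        = pvAInner t (i+1) (mo.insert u nxt) nm (inh.insert u c) (some c) (some u) := by
                      simp [pvAInner, hedit, hmsg, huid, hue, hcond]
                    rw [hA, List.foldl_cons]
                    have hstep : pvBStep (msgs, pos, nm.map (fun p => p.2), inh, pvPendOf none (some c)) nxt
                        = ((match pos.get? u with
                            | some j => (msgs.set j.toNat (u, nxt), pos)
                            | none => (msgs ++ [(u, nxt)], pos.insert u (msgs.length : Int))).1,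
                           (match pos.get? u with
                            | some j => (msgs.set j.toNat (u, nxt), pos)
                            | none => (msgs ++ [(u, nxt)], pos.insert u (msgs.length : Int))).2,
                           nm.map (fun p => p.2), inh.insert u c, pvPendOf (some u) (some c)) := by
                      have hcond' : (c != "" && (pvGet nxt "role" == some "user")) = true := by
                        rw [Bool.and_comm]; exact hcond
                      simp [pvBStep, hmsg, huid, hue, pvPendOf, hcond']
                    rw [hstep]
                    exact hrel
                · obtain ⟨c', r', hsplit, hh, hfst, hrel⟩ :=
                    ih (i+1) (mo.insert u nxt) nm inh (some c) none _ _ (hmp _ rfl)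
                  refine ⟨nxt :: c', r', by simp [hsplit], hh, ?_, ?_⟩
                  · rw [← hfst]; simp [pvAInner, hedit, hmsg, huid, hue, hcond]
                  · have hA : pvAInner (nxt :: t) i mo nm inh (some c) none
                        = pvAInner t (i+1) (mo.insert u nxt) nm inh (some c) none := by
                      simp [pvAInner, hedit, hmsg, huid, hue, hcond]
                    rw [hA, List.foldl_cons]
                    have hstep : pvBStep (msgs, pos, nm.map (fun p => p.2), inh, pvPendOf none (some c)) nxt
                        = ((match pos.get? u with
                            | some j => (msgs.set j.toNat (u, nxt), pos)
                            | none => (msgs ++ [(u, nxt)], pos.insert u (msgs.length : Int))).1,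
                           (match pos.get? u with
                            | some j => (msgs.set j.toNat (u, nxt), pos)
                            | none => (msgs ++ [(u, nxt)], pos.insert u (msgs.length : Int))).2,
                           nm.map (fun p => p.2), inh, pvPendOf none (some c)) := by
                      have hcond' : (c != "" && (pvGet nxt "role" == some "user")) = false := by
                        rw [Bool.and_comm]; simpa using hcond
                      simp [pvBStep, hmsg, huid, hue, pvPendOf, hcond']
                    rw [hstep]
                    exact hrel
      · -- non-message, non-edit record
        obtain ⟨c', r', hsplit, hh, hfst, hrel⟩ := ih (i+1) mo (nm ++ [(i, nxt)]) inh cut fnu msgs pos h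
        refine ⟨nxt :: c', r', by simp [hsplit], hh, ?_, ?_⟩
        · rw [← hfst]; simp [pvAInner, hedit, hmsg]
        · have hA : pvAInner (nxt :: t) i mo nm inh cut fnu
              = pvAInner t (i+1) mo (nm ++ [(i, nxt)]) inh cut fnu := by
            simp [pvAInner, hedit, hmsg]
          have hstep : pvBStep (msgs, pos, nm.map (fun p => p.2), inh, pvPendOf fnu cut) nxt
              = (msgs, pos, (nm ++ [(i, nxt)]).map (fun p => p.2), inh, pvPendOf fnu cut) := by
            simp [pvBStep, hedit, hmsg]
          rw [hA, List.foldl_cons, hstep]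
          exact hrel

-- simulation of the outer loop
theorem pvOuter_sim (rest : List PRec) (i : Int) (mo : PMO) (nm : List (Int × PRec)) (inh : PInh) :
    ∀ (msgs : List (String × PRec)) (pos : PySem.Dict String Int) (pending : Option String),
    pvInv mo msgs pos →
    (pending = none ∨ ∀ r t', rest = r :: t' → (pvGet r "record_type" == some "message_edit") = true) →
    (pvAOuter rest i mo nm inh).1.items = (rest.foldl pvBStep (msgs, pos, nm.map (fun p => p.2), inh, pending)).1 ∧
    (pvAOuter rest i mo nm inh).2.1.map (fun p => p.2) = (rest.foldl pvBStep (msgs, pos, nm.map (fun p => p.2), inh, pending)).2.2.1 ∧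
    (pvAOuter rest i mo nm inh).2.2 = (rest.foldl pvBStep (msgs, pos, nm.map (fun p => p.2), inh, pending)).2.2.2.1 := by
  suffices H : ∀ (n : Nat) (rest : List PRec), rest.length = n →
      ∀ (i : Int) (mo : PMO) (nm : List (Int × PRec)) (inh : PInh)
        (msgs : List (String × PRec)) (pos : PySem.Dict String Int) (pending : Option String),
      pvInv mo msgs pos →
      (pending = none ∨ ∀ r t', rest = r :: t' → (pvGet r "record_type" == some "message_edit") = true) →
      (pvAOuter rest i mo nm inh).1.items = (rest.foldl pvBStep (msgs, pos, nm.map (fun p => p.2), inh, pending)).1 ∧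
      (pvAOuter rest i mo nm inh).2.1.map (fun p => p.2) = (rest.foldl pvBStep (msgs, pos, nm.map (fun p => p.2), inh, pending)).2.2.1 ∧
      (pvAOuter rest i mo nm inh).2.2 = (rest.foldl pvBStep (msgs, pos, nm.map (fun p => p.2), inh, pending)).2.2.2.1 by
    intro msgs pos pending h hp
    exact H rest.length rest rfl i mo nm inh msgs pos pending h hp
  intro n
  induction n using Nat.strong_induction_on with
  | _ n IH =>
    intro rest hlen i mo nm inh msgs pos pending h hp
    cases rest with
    | nil =>
      simp only [pvAOuter, List.foldl_nil]
      refine ⟨h.1, ?_, ?_⟩ <;> first | rfl | trivial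
    | cons rec t =>
      have hlt : t.length < n := by simp at hlen; omega
      by_cases hmsg : (pvGet rec "record_type" == some "message") = true
      · -- message record
        have hrt : pvGet rec "record_type" = some "message" := by simpa using hmsg
        have hedit : (pvGet rec "record_type" == some "message_edit") = false := by simp [hrt]
        have hpn : pending = none := by
          rcases hp with hpn | hf
          · exact hpn
          · rw [hf rec t rfl] at hedit; cases hedit
        subst hpn
        cases huid : pvGet rec "uuid" with
        | none =>
          have hA : pvAOuter (rec :: t) i mo nm inh = pvAOuter t (i+1) mo nm inh := by
            simp [pvAOuter, hmsg, huid]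
          have hB : pvBStep (msgs, pos, nm.map (fun p => p.2), inh, none) rec
              = (msgs, pos, nm.map (fun p => p.2), inh, none) := by
            simp [pvBStep, hmsg, huid]
          rw [hA, List.foldl_cons, hB]
          exact IH t.length hlt t rfl (i+1) mo nm inh msgs pos none h (Or.inl rfl)
        | some u =>
          by_cases hue : (u == "") = true
          · have hA : pvAOuter (rec :: t) i mo nm inh = pvAOuter t (i+1) mo nm inh := by
              simp [pvAOuter, hmsg, huid, hue]
            have hB : pvBStep (msgs, pos, nm.map (fun p => p.2), inh, none) rec
                = (msgs, pos, nm.map (fun p => p.2), inh, none) := by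
              simp [pvBStep, hmsg, huid, hue]
            rw [hA, List.foldl_cons, hB]
            exact IH t.length hlt t rfl (i+1) mo nm inh msgs pos none h (Or.inl rfl)
          · have hA : pvAOuter (rec :: t) i mo nm inh = pvAOuter t (i+1) (mo.insert u rec) nm inh := by
              simp [pvAOuter, hmsg, huid, hue]
            cases hpj : pos.get? u with
            | some j =>
              have hInv' := pvInv_insert_old mo msgs pos u rec j h hpj
              have hB : pvBStep (msgs, pos, nm.map (fun p => p.2), inh, none) rec
                  = (msgs.set j.toNat (u, rec), pos, nm.map (fun p => p.2), inh, none) := by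
                simp [pvBStep, hmsg, huid, hue, hpj]
              rw [hA, List.foldl_cons, hB]
              exact IH t.length hlt t rfl (i+1) (mo.insert u rec) nm inh _ _ none hInv' (Or.inl rfl)
            | none =>
              have hInv' := pvInv_insert_new mo msgs pos u rec h hpj
              have hB : pvBStep (msgs, pos, nm.map (fun p => p.2), inh, none) rec
                  = (msgs ++ [(u, rec)], pos.insert u (msgs.length : Int), nm.map (fun p => p.2), inh, none) := by
                simp [pvBStep, hmsg, huid, hue, hpj]
              rw [hA, List.foldl_cons, hB]
              exact IH t.length hlt t rfl (i+1) (mo.insert u rec) nm inh _ _ none hInv' (Or.inl rfl)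
      · by_cases hedit : (pvGet rec "record_type" == some "message_edit") = true
        · -- message_edit record: truncate, then the inner loop
          have tail : ∀ (cutv : Option String) (mo2 : PMO) (msgs2 : List (String × PRec))
              (pos2 : PySem.Dict String Int), pvInv mo2 msgs2 pos2 →
              (pvAOuter (pvAInner t (i+1) mo2 nm inh cutv none).1
                 (pvAInner t (i+1) mo2 nm inh cutv none).2.1
                 (pvAInner t (i+1) mo2 nm inh cutv none).2.2.1
                 (pvAInner t (i+1) mo2 nm inh cutv none).2.2.2.1
                 (pvAInner t (i+1) mo2 nm inh cutv none).2.2.2.2).1.items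
                = (t.foldl pvBStep (msgs2, pos2, nm.map (fun p => p.2), inh, cutv)).1 ∧
              ((pvAOuter (pvAInner t (i+1) mo2 nm inh cutv none).1
                 (pvAInner t (i+1) mo2 nm inh cutv none).2.1
                 (pvAInner t (i+1) mo2 nm inh cutv none).2.2.1
                 (pvAInner t (i+1) mo2 nm inh cutv none).2.2.2.1
                 (pvAInner t (i+1) mo2 nm inh cutv none).2.2.2.2).2.1).map (fun p => p.2)
                = (t.foldl pvBStep (msgs2, pos2, nm.map (fun p => p.2), inh, cutv)).2.2.1 ∧
              (pvAOuter (pvAInner t (i+1) mo2 nm inh cutv none).1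
                 (pvAInner t (i+1) mo2 nm inh cutv none).2.1
                 (pvAInner t (i+1) mo2 nm inh cutv none).2.2.1
                 (pvAInner t (i+1) mo2 nm inh cutv none).2.2.2.1
                 (pvAInner t (i+1) mo2 nm inh cutv none).2.2.2.2).2.2
                = (t.foldl pvBStep (msgs2, pos2, nm.map (fun p => p.2), inh, cutv)).2.2.2.1 := by
            intro cutv mo2 msgs2 pos2 hInv2
            obtain ⟨consumed, rest', hsplit, hh, hfst, hrel⟩ :=
              pvInner_sim t (i+1) mo2 nm inh cutv none msgs2 pos2 hInv2
            have hrlen : rest'.length < n := by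
              have : t.length = consumed.length + rest'.length := by rw [hsplit]; simp
              omega
            obtain ⟨h1, h2, h3⟩ := hrel
            have IH' := IH rest'.length hrlen rest' rfl
              (pvAInner t (i+1) mo2 nm inh cutv none).2.1
              (pvAInner t (i+1) mo2 nm inh cutv none).2.2.1
              (pvAInner t (i+1) mo2 nm inh cutv none).2.2.2.1
              (pvAInner t (i+1) mo2 nm inh cutv none).2.2.2.2
              (consumed.foldl pvBStep (msgs2, pos2, nm.map (fun p => p.2), inh, cutv)).1
              (consumed.foldl pvBStep (msgs2, pos2, nm.map (fun p => p.2), inh, cutv)).2.1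
              (consumed.foldl pvBStep (msgs2, pos2, nm.map (fun p => p.2), inh, cutv)).2.2.2.2
              h1 (Or.inr hh)
            have hsm2 : ((consumed.foldl pvBStep (msgs2, pos2, nm.map (fun p => p.2), inh, cutv)).1,
                (consumed.foldl pvBStep (msgs2, pos2, nm.map (fun p => p.2), inh, cutv)).2.1,
                List.map (fun p => p.2) (pvAInner t (i+1) mo2 nm inh cutv none).2.2.2.1,
                (pvAInner t (i+1) mo2 nm inh cutv none).2.2.2.2,
                (consumed.foldl pvBStep (msgs2, pos2, nm.map (fun p => p.2), inh, cutv)).2.2.2.2)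
                = consumed.foldl pvBStep (msgs2, pos2, nm.map (fun p => p.2), inh, cutv) := by
              rw [h2, h3]; rfl
            rw [hsm2] at IH'
            have hfold : t.foldl pvBStep (msgs2, pos2, nm.map (fun p => p.2), inh, cutv)
                = rest'.foldl pvBStep
                    (consumed.foldl pvBStep (msgs2, pos2, nm.map (fun p => p.2), inh, cutv)) := by
              rw [hsplit, List.foldl_append]
            rw [hfold, hfst]
            exact IH'
          cases hg : pvGet rec "edited_message_uuid" with
          | none =>
            have hA : pvAOuter (rec :: t) i mo nm inh
                = (pvAOuter (pvAInner t (i+1) mo nm inh none none).1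
                    (pvAInner t (i+1) mo nm inh none none).2.1
                    (pvAInner t (i+1) mo nm inh none none).2.2.1
                    (pvAInner t (i+1) mo nm inh none none).2.2.2.1
                    (pvAInner t (i+1) mo nm inh none none).2.2.2.2) := by
              simp [pvAOuter, hmsg, hedit, hg]
            have hB : pvBStep (msgs, pos, nm.map (fun p => p.2), inh, pending) rec
                = (msgs, pos, nm.map (fun p => p.2), inh, none) := by
              simp [pvBStep, hmsg, hedit, hg]
            rw [hA, List.foldl_cons, hB]
            exact tail none mo msgs pos h
          | some tg =>
            by_cases htg : (tg == "") = true
            · have hcond : (tg != "" && mo.contains tg) = false := by simp only [bne, htg, Bool.not_true, Bool.false_and]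
              have hA : pvAOuter (rec :: t) i mo nm inh
                  = (pvAOuter (pvAInner t (i+1) mo nm inh none none).1
                      (pvAInner t (i+1) mo nm inh none none).2.1
                      (pvAInner t (i+1) mo nm inh none none).2.2.1
                      (pvAInner t (i+1) mo nm inh none none).2.2.2.1
                      (pvAInner t (i+1) mo nm inh none none).2.2.2.2) := by
                simp [pvAOuter, hmsg, hedit, hg, hcond]
              have hB : pvBStep (msgs, pos, nm.map (fun p => p.2), inh, pending) rec
                  = (msgs, pos, nm.map (fun p => p.2), inh, none) := by
                simp [pvBStep, hmsg, hedit, hg, htg]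
              rw [hA, List.foldl_cons, hB]
              exact tail none mo msgs pos h
            · cases hpj : pos.get? tg with
              | none =>
                have hcont := pvContains_false mo msgs pos tg h hpj
                have hcond : (tg != "" && mo.contains tg) = false := by simp only [hcont, Bool.and_false]
                have hA : pvAOuter (rec :: t) i mo nm inh
                    = (pvAOuter (pvAInner t (i+1) mo nm inh none none).1
                        (pvAInner t (i+1) mo nm inh none none).2.1
                        (pvAInner t (i+1) mo nm inh none none).2.2.1
                        (pvAInner t (i+1) mo nm inh none none).2.2.2.1
                        (pvAInner t (i+1) mo nm inh none none).2.2.2.2) := by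
                  simp [pvAOuter, hmsg, hedit, hg, hcond]
                have hB : pvBStep (msgs, pos, nm.map (fun p => p.2), inh, pending) rec
                    = (msgs, pos, nm.map (fun p => p.2), inh, none) := by
                  simp [pvBStep, hmsg, hedit, hg, htg, hpj]
                rw [hA, List.foldl_cons, hB]
                exact tail none mo msgs pos h
              | some j =>
                obtain ⟨hidx, hcont⟩ := pvIndex_eq mo msgs pos tg j h hpj
                have htg' : (tg == "") = false := eq_false_of_ne_true htg
                have hcond : (tg != "" && mo.contains tg) = true := by
                  simp only [bne, htg', Bool.not_false, hcont, Bool.and_self]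
                have hidx' : List.idxOf? tg (PySem.Dict.keys mo) = some j.toNat := hidx
                have hcut := pvCutUser_eq mo msgs pos j h
                have hInv2 := pvInv_truncate mo msgs pos j h
                have hA : pvAOuter (rec :: t) i mo nm inh
                    = (pvAOuter
                        (pvAInner t (i+1)
                          ((mo.keys.drop j.toNat).foldl (fun d k => d.erase k) mo) nm inh
                          ((mo.keys.drop j.toNat).find? fun k =>
                            pvGet ((mo.get? k).getD []) "role" == some "user") none).1
                        (pvAInner t (i+1)
                          ((mo.keys.drop j.toNat).foldl (fun d k => d.erase k) mo) nm inh
                          ((mo.keys.drop j.toNat).find? fun k =>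
                            pvGet ((mo.get? k).getD []) "role" == some "user") none).2.1
                        (pvAInner t (i+1)
                          ((mo.keys.drop j.toNat).foldl (fun d k => d.erase k) mo) nm inh
                          ((mo.keys.drop j.toNat).find? fun k =>
                            pvGet ((mo.get? k).getD []) "role" == some "user") none).2.2.1
                        (pvAInner t (i+1)
                          ((mo.keys.drop j.toNat).foldl (fun d k => d.erase k) mo) nm inh
                          ((mo.keys.drop j.toNat).find? fun k =>
                            pvGet ((mo.get? k).getD []) "role" == some "user") none).2.2.2.1
                        (pvAInner t (i+1)
                          ((mo.keys.drop j.toNat).foldl (fun d k => d.erase k) mo) nm inh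
                          ((mo.keys.drop j.toNat).find? fun k =>
                            pvGet ((mo.get? k).getD []) "role" == some "user") none).2.2.2.2) := by
                  simp [pvAOuter, hmsg, hedit, hg, hcond, hidx']
                have hB : pvBStep (msgs, pos, nm.map (fun p => p.2), inh, pending) rec
                    = (msgs.take j.toNat, (msgs.drop j.toNat).foldl (fun d p => d.erase p.1) pos,
                       nm.map (fun p => p.2), inh,
                       ((msgs.drop j.toNat).find? fun p => pvGet p.2 "role" == some "user").map (fun p => p.1)) := by
                  simp [pvBStep, hmsg, hedit, hg, htg, hpj]
                rw [hA, List.foldl_cons, hB, ← hcut]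
                exact tail _ _ _ _ hInv2
        · -- other record types
          have hpn : pending = none := by
            rcases hp with hpn | hf
            · exact hpn
            · exact absurd (hf rec t rfl) hedit
          subst hpn
          have hA : pvAOuter (rec :: t) i mo nm inh = pvAOuter t (i+1) mo (nm ++ [(i, rec)]) inh := by
            simp [pvAOuter, hmsg, hedit]
          have hB : pvBStep (msgs, pos, nm.map (fun p => p.2), inh, none) rec
              = (msgs, pos, (nm ++ [(i, rec)]).map (fun p => p.2), inh, none) := by
            simp [pvBStep, hmsg, hedit]
          rw [hA, List.foldl_cons, hB]
          exact IH t.length hlt t rfl (i+1) mo (nm ++ [(i, rec)]) inh msgs pos none h (Or.inl rfl)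

-- ===== VERDICT (by name: the statement is the Claim_ definition above) =====
theorem replay_records_py_spec : Claim_equal_replay_records_py := by
  intro raw _
  unfold Spec_replay_records_py replay_records_py replay_records_py_alt
  have h := pvOuter_sim raw 0 PySem.Dict.empty [] PySem.Dict.empty [] PySem.Dict.empty none
    pvInv_empty (Or.inl rfl)
  simp only [List.map_nil] at h
  obtain ⟨h1, h2, h3⟩ := h
  simp only [PySem.Dict.values, h1, h2, h3]
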